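-- pv_equiv track=rewrite | github.com/jasonlemming/Hearing-Database | fetchers/witness_fetcher.py | infer_witness_type
-- ===== SOURCE A (Python) =====
-- from typing import List, Dict, Any, Optional, Tuple
--
-- def infer_witness_type(witness_data: Dict[str, Any]) -> str:
--     """
--     Infer witness type from organization and position information
--
--     Args:
--         witness_data: Witness data
--
--     Returns:
--         Witness type category
--     """
--     organization = witness_data.get('organization', '').lower()
--     position = witness_data.get('title', '').lower()
--
--     # Government indicators
--     gov_indicators = [
--         'department of', 'agency', 'bureau', 'office of', 'administration',
--         'commission', 'federal', 'u.s.', 'united states', 'government',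
--         'secretary', 'administrator', 'director', 'commissioner'
--     ]
--
--     if any(indicator in organization for indicator in gov_indicators):
--         return 'Government'
--
--     if any(indicator in position for indicator in ['secretary', 'administrator', 'commissioner']):
--         return 'Government'
--
--     # Academic indicators
--     academic_indicators = [
--         'university', 'college', 'institute', 'school', 'research',
--         'academic', 'professor', 'dr.', 'phd'
--     ]
--
--     if any(indicator in organization for indicator in academic_indicators):
--         return 'Academic'
--
--     if any(indicator in position for indicator in ['professor', 'researcher']):
--         return 'Academic'
--
--     # Nonprofit indicators
--     nonprofit_indicators = [
--         'foundation', 'association', 'society', 'council', 'coalition',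
--         'alliance', 'nonprofit', 'non-profit', 'center for', 'institute for'
--     ]
--
--     if any(indicator in organization for indicator in nonprofit_indicators):
--         return 'Nonprofit'
--
--     # Default to private sector
--     return 'Private'
-- ===== SOURCE B (Python) =====
-- def infer_witness_type(witness_data):
--     organization = witness_data.get('organization', '').lower()
--     position = witness_data.get('title', '').lower()
--     gov_org = ['department of', 'agency', 'bureau', 'office of', 'administration',
--                'commission', 'federal', 'u.s.', 'united states', 'government',
--                'secretary', 'administrator', 'director', 'commissioner']
--     gov_pos = ['secretary', 'administrator', 'commissioner']
--     aca_org = ['university', 'college', 'institute', 'school', 'research',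
--                'academic', 'professor', 'dr.', 'phd']
--     aca_pos = ['professor', 'researcher']
--     npo_org = ['foundation', 'association', 'society', 'council', 'coalition',
--                'alliance', 'nonprofit', 'non-profit', 'center for', 'institute for']
--     checks = ([(0, organization, k) for k in gov_org]
--               + [(1, position, k) for k in gov_pos]
--               + [(2, organization, k) for k in aca_org]
--               + [(3, position, k) for k in aca_pos]
--               + [(4, organization, k) for k in npo_org])
--     best = min((p for p, field, k in checks if k in field), default=5)
--     return ['Government', 'Government', 'Academic', 'Academic', 'Nonprofit', 'Private'][best]
-- ===== Notes on version B (the rewrite author's own statement) =====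
-- stated objective: alternative
-- what changed: Replaces the early-return if-cascade with one flat aggregation pass: all (priority, field, keyword) checks are flattened into a single list, the minimum matched priority is taken (default 5), and a category table is indexed by it.
import Mathlib
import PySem

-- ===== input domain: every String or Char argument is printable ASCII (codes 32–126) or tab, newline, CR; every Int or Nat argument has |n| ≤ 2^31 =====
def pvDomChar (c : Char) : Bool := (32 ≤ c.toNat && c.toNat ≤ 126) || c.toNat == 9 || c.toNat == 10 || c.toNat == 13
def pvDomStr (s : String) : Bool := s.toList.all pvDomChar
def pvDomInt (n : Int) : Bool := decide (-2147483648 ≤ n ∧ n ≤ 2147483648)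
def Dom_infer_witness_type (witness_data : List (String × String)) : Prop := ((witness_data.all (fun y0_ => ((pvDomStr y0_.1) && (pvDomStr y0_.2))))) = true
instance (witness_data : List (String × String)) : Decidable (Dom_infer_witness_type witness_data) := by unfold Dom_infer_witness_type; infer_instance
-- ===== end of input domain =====

-- B replaces A's early-return if-cascade by one flat aggregation pass: it flattens all
-- (priority, field, keyword) checks, takes the minimum matched priority, and indexes a
-- category table (alternative decomposition; same return value everywhere).

-- ===== PORT A =====
-- literal transliteration of A's if-cascade
def infer_witness_type (witness_data : List (String × String)) : String :=
  let organization := PySem.Str.lower ((PySem.Dict.mk witness_data).getD "organization" "")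
  let position := PySem.Str.lower ((PySem.Dict.mk witness_data).getD "title" "")
  let gov_indicators := ["department of", "agency", "bureau", "office of", "administration",
    "commission", "federal", "u.s.", "united states", "government",
    "secretary", "administrator", "director", "commissioner"]
  if gov_indicators.any (fun indicator => PySem.Str.isIn indicator organization) then
    "Government"
  else if (["secretary", "administrator", "commissioner"]).any
      (fun indicator => PySem.Str.isIn indicator position) then
    "Government"
  else
    let academic_indicators := ["university", "college", "institute", "school", "research",
      "academic", "professor", "dr.", "phd"]
    if academic_indicators.any (fun indicator => PySem.Str.isIn indicator organization) then
      "Academic"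
    else if (["professor", "researcher"]).any
        (fun indicator => PySem.Str.isIn indicator position) then
      "Academic"
    else
      let nonprofit_indicators := ["foundation", "association", "society", "council", "coalition",
        "alliance", "nonprofit", "non-profit", "center for", "institute for"]
      if nonprofit_indicators.any (fun indicator => PySem.Str.isIn indicator organization) then
        "Nonprofit"
      else
        "Private"

-- ===== PORT B =====
-- literal transliteration of Source B: flatten all checks, min matched priority, index table
def infer_witness_type_alt (witness_data : List (String × String)) : String :=
  let organization := PySem.Str.lower ((PySem.Dict.mk witness_data).getD "organization" "")
  let position := PySem.Str.lower ((PySem.Dict.mk witness_data).getD "title" "")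
  let gov_org := ["department of", "agency", "bureau", "office of", "administration",
    "commission", "federal", "u.s.", "united states", "government",
    "secretary", "administrator", "director", "commissioner"]
  let gov_pos := ["secretary", "administrator", "commissioner"]
  let aca_org := ["university", "college", "institute", "school", "research",
    "academic", "professor", "dr.", "phd"]
  let aca_pos := ["professor", "researcher"]
  let npo_org := ["foundation", "association", "society", "council", "coalition",
    "alliance", "nonprofit", "non-profit", "center for", "institute for"]
  let checks : List (Nat × String × String) :=
    gov_org.map (fun k => (0, organization, k))
    ++ gov_pos.map (fun k => (1, position, k))
    ++ aca_org.map (fun k => (2, organization, k))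
    ++ aca_pos.map (fun k => (3, position, k))
    ++ npo_org.map (fun k => (4, organization, k))
  -- min(generator, default=5) ported as a fold of Nat.min starting from the default
  let best := (checks.filterMap (fun t => if PySem.Str.isIn t.2.2 t.2.1 then some t.1 else none)).foldl Nat.min 5
  (["Government", "Government", "Academic", "Academic", "Nonprofit", "Private"]).getD best "Private"

-- ===== PRECONDITION & SPEC =====
def Spec_infer_witness_type (witness_data : List (String × String)) (out : String) : Prop := out = infer_witness_type_alt witness_data
instance (witness_data : List (String × String)) (out : String) : Decidable (Spec_infer_witness_type witness_data out) := by unfold Spec_infer_witness_type; infer_instance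

-- ===== CLAIM (what is proved, stated in full; the proofs are below) =====
def Claim_equal_infer_witness_type : Prop := ∀ (witness_data : List (String × String)), Dom_infer_witness_type witness_data → Spec_infer_witness_type witness_data (infer_witness_type witness_data)

-- ===== LEMMAS AND PROOFS =====

-- one keyword group's contribution to the min-fold: it lowers the accumulator to p iff some keyword matches
theorem foldl_min_group (lst : List String) (f : String) (p acc : Nat) :
    ((lst.map (fun k => (p, f, k))).filterMap
        (fun t : Nat × String × String => if PySem.Str.isIn t.2.2 t.2.1 then some t.1 else none)).foldl Nat.min acc
      = if lst.any (fun k => PySem.Str.isIn k f) then Nat.min acc p else acc := by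
  induction lst generalizing acc with
  | nil => simp
  | cons h t ih =>
    simp only [List.map_cons, List.filterMap_cons, List.any_cons]
    by_cases hm : PySem.Str.isIn h f
    · simp only [hm, List.foldl_cons, ih, Bool.true_or, if_true]
      cases ht : t.any (fun k => PySem.Str.isIn k f) <;>
        simp
    · simp only [hm, Bool.false_eq_true, reduceIte, ih, Bool.false_or]

theorem infer_witness_type_spec : Claim_equal_infer_witness_type := by
  intro wd _
  unfold Spec_infer_witness_type infer_witness_type infer_witness_type_alt
  simp only [List.filterMap_append, List.foldl_append, foldl_min_group]
  split_ifs <;> rfl
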